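-- pv_equiv track=rewrite | github.com/matthinz/aoc-2023 | day01/day01.py | replace_last_english_digit
-- ===== SOURCE A (Python) =====
-- def replace_last_english_digit(line, english_digits):
--     last_index = float("-inf")
--     to_replace = None
--
--     for english_digit in english_digits:
--         index = line.rfind(english_digit)
--         if index >= 0 and index > last_index:
--             last_index = index
--             to_replace = english_digit
--
--     if to_replace:
--         replacement = str(english_digits.index(to_replace) + 1)
--         parts = line.rpartition(to_replace)
--         return parts[0] + replacement + parts[2]
--
--     return line
-- ===== SOURCE B (Python) =====
-- def replace_last_english_digit(line, english_digits):
--     words = tuple(english_digits)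
--     for i in range(len(line) - 1, -1, -1):
--         if line.startswith(words, i):
--             for word in english_digits:
--                 if line.startswith(word, i):
--                     return line[:i] + str(english_digits.index(word) + 1) + line[i + len(word):]
--     return line
-- ===== Notes on version B (the rewrite author's own statement) =====
-- stated objective: faster
-- what changed: Instead of one whole-string rfind scan per word plus an rpartition, B scans the positions of the line from the right (one C-level tuple startswith test per position) and returns at the first position where any word matches (first word in list order there), splicing the numeral in by slicing; it stops at the rightmost match instead of always scanning the whole line once per word.
-- outside the precondition, e.g. on replace_last_english_digit('one', ['', 'one']): A returns 'one', B returns 'on1e'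
import Mathlib
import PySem

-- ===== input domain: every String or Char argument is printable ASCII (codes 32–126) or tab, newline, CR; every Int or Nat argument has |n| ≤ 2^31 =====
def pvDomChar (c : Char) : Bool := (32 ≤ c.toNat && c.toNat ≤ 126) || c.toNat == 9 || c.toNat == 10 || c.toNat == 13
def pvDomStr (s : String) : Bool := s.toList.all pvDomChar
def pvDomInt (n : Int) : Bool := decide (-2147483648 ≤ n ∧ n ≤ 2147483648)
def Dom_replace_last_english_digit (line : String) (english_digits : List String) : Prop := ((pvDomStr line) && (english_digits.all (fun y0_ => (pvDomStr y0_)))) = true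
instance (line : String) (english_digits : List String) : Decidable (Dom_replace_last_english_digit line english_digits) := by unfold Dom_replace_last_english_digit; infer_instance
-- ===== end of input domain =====

-- B replaces A's per-word rfind scans + rpartition by a right-to-left scan over the
-- positions of the line, returning at the first position where any word matches;
-- alternative decomposition, same exact result on Pre_.

-- ===== PORT A =====

-- hand port of str.rpartition(sep) (exact for nonempty sep: split at the last occurrence, else ('', '', s))
def pyRpartition (s sep : List Char) : List Char × List Char × List Char :=
  let i := PySem.Chars.rfind s sep
  if 0 ≤ i then (s.take i.toNat, sep, s.drop (i.toNat + sep.length)) else ([], [], s)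

def replace_last_english_digit (line : String) (english_digits : List String) : String :=
  -- state (last_index, to_replace): 'none' in the first slot models float('-inf')
  let st := english_digits.foldl
    (fun (st : Option Int × Option String) w =>
      let index := PySem.Str.rfind line w
      if (decide (0 ≤ index) && st.1.all (fun l => decide (l < index))) = true
      then (some index, some w) else st)
    (none, none)
  match st.2 with
  | some w =>
    if w ≠ "" then    -- Python truthiness: `if to_replace:` is false for '' as well as None
      match PySem.List.index? english_digits w with
      | some k =>
        let parts := pyRpartition line.toList w.toList
        String.mk (parts.1 ++ PySem.Int.toChars (k + 1) ++ parts.2.2)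
      | none => line  -- unreachable: to_replace is an element of english_digits
    else line
  | none => line

-- ===== PORT B =====

def replace_last_english_digit_alt (line : String) (english_digits : List String) : String :=
  let cs := line.toList
  -- 'for i in range(len(line)-1, -1, -1): if line.startswith(words, i): …' — a backwards scan
  -- returning at the first position where any word matches; line.startswith(words, i) with
  -- words = tuple(english_digits) is 'some word matches at i', and for 0 ≤ i ≤ len(line)
  -- line.startswith(w, i) is startswith of line[i:]
  match (List.range cs.length).reverse.find?
      (fun i => english_digits.any (fun w => PySem.Chars.startswith (cs.drop i) w.toList)) with
  | none => line
  | some i =>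
    -- the inner 'for word …: if line.startswith(word, i): return …' is a first-match search
    match english_digits.find? (fun w => PySem.Chars.startswith (cs.drop i) w.toList) with
    | some w =>
      match PySem.List.index? english_digits w with
      | some k =>
        String.mk (PySem.List.slice cs none (some (i : Int)) ++ PySem.Int.toChars (k + 1)
                   ++ PySem.List.slice cs (some ((i : Int) + PySem.Str.len w)) none)
      | none => line  -- unreachable: w is an element of english_digits
    | none => line    -- unreachable: some word matches at i

-- ===== PRECONDITION & SPEC =====
-- Pre_ excludes word lists containing '': there A's falsy `if to_replace:` silently drops the
-- match of '' (A returns the line unchanged) while B treats '' as matching at every position;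
-- both behaviours on that nonsensical query are accidental, so it is left unspecified.
def Pre_replace_last_english_digit (line : String) (english_digits : List String) : Prop :=
  "" ∉ english_digits
instance (line : String) (english_digits : List String) : Decidable (Pre_replace_last_english_digit line english_digits) := by unfold Pre_replace_last_english_digit; infer_instance

def pvWitness_replace_last_english_digit : String × List String :=
  ("two1nine", ["one","two","three","four","five","six","seven","eight","nine"])

def Spec_replace_last_english_digit (line : String) (english_digits : List String) (out : String) : Prop := out = replace_last_english_digit_alt line english_digits
instance (line : String) (english_digits : List String) (out : String) : Decidable (Spec_replace_last_english_digit line english_digits out) := by unfold Spec_replace_last_english_digit; infer_instance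

-- ===== CLAIM (what is proved, stated in full; the proofs are below) =====
def Claim_equal_replace_last_english_digit : Prop := ∀ (line : String) (english_digits : List String), Dom_replace_last_english_digit line english_digits → Pre_replace_last_english_digit line english_digits → Spec_replace_last_english_digit line english_digits (replace_last_english_digit line english_digits)

-- ===== LEMMAS AND PROOFS =====

-- proof-side names for the two loop bodies (definitionally equal to the ports' lambdas)
def stepA (cs : List Char) (st : Option Int × Option String) (w : String) : Option Int × Option String :=
  let index := PySem.Chars.rfind cs w.toList
  if (decide (0 ≤ index) && st.1.all (fun l => decide (l < index))) = true
  then (some index, some w) else st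


-- ---- facts about Chars.rfind ----

theorem rfind_go_le_iff (s sub : List Char) (k : Nat) (j : Nat) (hj : j ≤ k)
    (hp : sub.isPrefixOf (s.drop j) = true) : (j : Int) ≤ PySem.Chars.rfind.go s sub k := by
  induction k with
  | zero =>
    interval_cases j
    simp only [List.drop_zero] at hp
    simp [PySem.Chars.rfind.go, List.isPrefixOf_iff_prefix.mp hp]
  | succ k ih =>
    rw [PySem.Chars.rfind.go]
    split
    · omega
    · rcases Nat.lt_or_ge j (k+1) with h | h
      · exact ih (by omega)
      · have : j = k + 1 := by omega
        subst this; simp_all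

theorem rfind_go_cases (s sub : List Char) (k : Nat) :
    PySem.Chars.rfind.go s sub k = -1 ∨
      (0 ≤ PySem.Chars.rfind.go s sub k ∧ (PySem.Chars.rfind.go s sub k).toNat ≤ k ∧
        sub.isPrefixOf (s.drop (PySem.Chars.rfind.go s sub k).toNat) = true) := by
  induction k with
  | zero =>
    by_cases hp : sub.isPrefixOf s = true
    · right; simp [PySem.Chars.rfind.go, hp]
    · left
      simp only [PySem.Chars.rfind.go]
      rw [if_neg (by simpa [List.isPrefixOf_iff_prefix] using hp)]
  | succ k ih =>
    rw [PySem.Chars.rfind.go]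
    split
    · right
      refine ⟨by omega, by simp, ?_⟩
      simpa using ‹sub.isPrefixOf (List.drop (k+1) s) = true›
    · rcases ih with h | ⟨h1, h2, h3⟩
      · left; exact h
      · right; exact ⟨h1, by omega, h3⟩

theorem prefix_drop_lt_length (s sub : List Char) (j : Nat) (hne : sub ≠ [])
    (hp : sub.isPrefixOf (s.drop j) = true) : j < s.length := by
  by_contra h
  have hdrop : s.drop j = [] := List.drop_eq_nil_of_le (by omega)
  rw [hdrop, List.isPrefixOf_iff_prefix] at hp
  exact hne (List.prefix_nil.mp hp)

theorem rfind_le (cs : List Char) (w : List Char) (j : Nat)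
    (hp : w.isPrefixOf (cs.drop j) = true) (hne : w ≠ []) :
    (j : Int) ≤ PySem.Chars.rfind cs w := by
  have hj : j < cs.length := prefix_drop_lt_length cs w j hne hp
  exact rfind_go_le_iff cs w cs.length j (by omega) hp

theorem rfind_cases (cs : List Char) (w : List Char) :
    PySem.Chars.rfind cs w = -1 ∨
      (0 ≤ PySem.Chars.rfind cs w ∧ (PySem.Chars.rfind cs w).toNat ≤ cs.length ∧
        w.isPrefixOf (cs.drop (PySem.Chars.rfind cs w).toNat) = true) :=
  rfind_go_cases cs w cs.length

theorem rfind_neg_one_le (cs w : List Char) : -1 ≤ PySem.Chars.rfind cs w := by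
  rcases rfind_cases cs w with h | ⟨h, _, _⟩ <;> omega

-- ---- A's fold is a strict argmax over rfind ----

def stValA (st : Option Int × Option String) : Int := st.1.getD (-1)

theorem stepA_eq (cs : List Char) (st : Option Int × Option String) (w : String)
    (h0 : ∀ l ∈ st.1, 0 ≤ l) :
    stepA cs st w =
      if stValA st < PySem.Chars.rfind cs w.toList
      then (some (PySem.Chars.rfind cs w.toList), some w) else st := by
  have hge := rfind_neg_one_le cs w.toList
  cases h : st.1 with
  | none =>
    simp only [stepA, stValA, h]
    by_cases hc : (0:Int) ≤ PySem.Chars.rfind cs w.toList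
    · rw [if_pos (by simp [hc]), if_pos (by simpa using (by omega : (-1:Int) < _))]
    · rw [if_neg (by simp [hc]), if_neg (by simp; omega)]
  | some l =>
    have hl := h0 l (by simp [h])
    simp only [stepA, stValA, h]
    by_cases hc : l < PySem.Chars.rfind cs w.toList
    · rw [if_pos (by simp [hc]; omega), if_pos (by simpa using hc)]
    · rw [if_neg (by simp; omega), if_neg (by simpa using hc)]

theorem stValA_ge (st : Option Int × Option String) (h0 : ∀ l ∈ st.1, 0 ≤ l) :
    -1 ≤ stValA st := by
  cases h : st.1 with
  | none => simp [stValA, h]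
  | some l => have := h0 l (by simp [h]); simp [stValA, h]; omega

theorem foldA_eq (cs : List Char) (ws : List String) (st : Option Int × Option String)
    (h0 : ∀ l ∈ st.1, 0 ≤ l) :
    ws.foldl (stepA cs) st =
    (let m := ws.foldl (fun a w => max a (PySem.Chars.rfind cs w.toList)) (stValA st)
     if m ≤ stValA st then st
     else (some m, ws.find? (fun w => PySem.Chars.rfind cs w.toList == m))) := by
  induction ws generalizing st with
  | nil => simp
  | cons w ws ih =>
    have hge := rfind_neg_one_le cs w.toList
    have hmax := PySem.List.le_foldl_max_int ws (fun w => PySem.Chars.rfind cs w.toList)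
    have hsv := stValA_ge st h0
    set i := PySem.Chars.rfind cs w.toList with hi
    simp only [List.foldl_cons, stepA_eq cs st w h0, ← hi]
    by_cases hc : stValA st < i
    · rw [if_pos hc]
      rw [ih (some i, some w) (by intro l hl; simp at hl; omega)]
      have hv : stValA (some i, some w) = i := rfl
      have hinit : max (stValA st) i = i := by omega
      simp only [hv, hinit]
      set m := ws.foldl (fun a w => max a (PySem.Chars.rfind cs w.toList)) i with hm
      have him : i ≤ m := (hmax i).1
      by_cases hmi : m ≤ i
      · have hieq : m = i := le_antisymm hmi him
        simp only [hieq, if_pos (le_refl i), if_neg (show ¬ i ≤ stValA st by omega)]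
        rw [List.find?_cons_of_pos (by simp [← hi])]
      · simp only [if_neg hmi, if_neg (show ¬ m ≤ stValA st by omega)]
        rw [List.find?_cons_of_neg (by simp [← hi]; omega)]
    · rw [if_neg hc]
      rw [ih st h0]
      have hinit : max (stValA st) i = stValA st := by omega
      simp only [hinit]
      set m := ws.foldl (fun a w => max a (PySem.Chars.rfind cs w.toList)) (stValA st) with hm
      have hsm : stValA st ≤ m := (hmax (stValA st)).1
      by_cases hms : m ≤ stValA st
      · simp [hms]
      · simp only [if_neg hms]
        rw [List.find?_cons_of_neg (by simp [← hi]; omega)]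

theorem foldl_max_mem_proj (cs : List Char) (ws : List String) (init : Int) :
    ws.foldl (fun a w => max a (PySem.Chars.rfind cs w.toList)) init = init ∨
      ∃ w ∈ ws, ws.foldl (fun a w => max a (PySem.Chars.rfind cs w.toList)) init
        = PySem.Chars.rfind cs w.toList := by
  induction ws generalizing init with
  | nil => left; rfl
  | cons w ws ih =>
    simp only [List.foldl_cons]
    rcases ih (max init (PySem.Chars.rfind cs w.toList)) with h | ⟨w', hw', h⟩
    · by_cases hle : PySem.Chars.rfind cs w.toList ≤ init
      · left; rw [h]; omega
      · right
        refine ⟨w, by simp, ?_⟩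
        rw [h]; omega
    · right; exact ⟨w', by simp [hw'], h⟩

-- ---- B's fold: last position with a match ----

def hitAt (cs : List Char) (ws : List String) (i : Nat) : Option String :=
  ws.find? (fun w => PySem.Chars.startswith (cs.drop i) w.toList)

theorem findRev_none (p : Nat → Bool) (n : Nat) (h : ∀ i < n, p i = false) :
    (List.range n).reverse.find? p = none := by
  apply List.find?_eq_none.mpr
  intro i hi
  simp only [List.mem_reverse, List.mem_range] at hi
  simp [h i hi]

theorem findRev_some (p : Nat → Bool) (n L : Nat) (hL : L < n) (hp : p L = true)
    (hafter : ∀ j, L < j → j < n → p j = false) :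
    (List.range n).reverse.find? p = some L := by
  induction n with
  | zero => omega
  | succ n ih =>
    rw [List.range_succ, List.reverse_append]
    simp only [List.reverse_cons, List.reverse_nil, List.nil_append, List.cons_append,
      List.nil_append]
    by_cases hLn : L = n
    · subst hLn
      rw [List.find?_cons_of_pos hp]
    · rw [List.find?_cons_of_neg (by simp [hafter n (by omega) (by omega)])]
      exact ih (by omega) (fun j hj1 hj2 => hafter j hj1 (by omega))

theorem find?_congr_mem {α : Type} (l : List α) (p q : α → Bool)
    (h : ∀ x ∈ l, p x = q x) : l.find? p = l.find? q := by
  induction l with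
  | nil => rfl
  | cons x l ih =>
    have hx := h x (by simp)
    by_cases hp : p x = true
    · rw [List.find?_cons_of_pos hp, List.find?_cons_of_pos (hx ▸ hp)]
    · rw [List.find?_cons_of_neg (by simpa using hp),
          List.find?_cons_of_neg (by rw [← hx]; simpa using hp)]
      exact ih (fun x hxl => h x (by simp [hxl]))

-- the ports, re-expressed through the named step/finish functions (definitional)
def finishA (line : String) (ws : List String) : Option String → String
  | some w =>
    if w ≠ "" then
      match PySem.List.index? ws w with
      | some k =>
        String.mk ((pyRpartition line.toList w.toList).1 ++ PySem.Int.toChars (k + 1)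
          ++ (pyRpartition line.toList w.toList).2.2)
      | none => line
    else line
  | none => line

def finishB (line : String) (ws : List String) : Option Nat → String
  | none => line
  | some i =>
    match ws.find? (fun w => PySem.Chars.startswith (line.toList.drop i) w.toList) with
    | some w =>
      match PySem.List.index? ws w with
      | some k =>
        String.mk (PySem.List.slice line.toList none (some (i : Int)) ++ PySem.Int.toChars (k + 1)
                   ++ PySem.List.slice line.toList (some ((i : Int) + PySem.Str.len w)) none)
      | none => line
    | none => line

theorem portA_eq (line : String) (ws : List String) :
    replace_last_english_digit line ws =
      finishA line ws (ws.foldl (stepA line.toList) (none, none)).2 := rfl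

theorem portB_eq (line : String) (ws : List String) :
    replace_last_english_digit_alt line ws =
      finishB line ws ((List.range line.toList.length).reverse.find?
        (fun i => ws.any (fun w => PySem.Chars.startswith (line.toList.drop i) w.toList))) := rfl

-- ===== VERDICT (by name: the statement is the Claim_ definition above) =====
theorem replace_last_english_digit_spec : Claim_equal_replace_last_english_digit := by
  intro line ws _ hpre
  unfold Spec_replace_last_english_digit
  rw [portA_eq, portB_eq]
  set cs := line.toList with hcs
  have hne : ∀ w ∈ ws, w.toList ≠ [] := by
    intro w hw h
    exact hpre (String.toList_eq_nil_iff.mp h ▸ hw)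
  have hmax := PySem.List.le_foldl_max_int ws (fun w => PySem.Chars.rfind cs w.toList)
  set m := ws.foldl (fun a w => max a (PySem.Chars.rfind cs w.toList)) (-1) with hmdef
  have hfoldA := foldA_eq cs ws (none, none) (by simp)
  have hsv : stValA ((none : Option Int), (none : Option String)) = -1 := rfl
  rw [hsv] at hfoldA
  by_cases hm : m ≤ -1
  · -- no word occurs in the line: both return it unchanged
    rw [hfoldA]
    simp only [← hmdef, if_pos hm]
    have hBnone : (List.range cs.length).reverse.find?
        (fun i => ws.any (fun w => PySem.Chars.startswith (cs.drop i) w.toList)) = none := by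
      apply findRev_none
      intro i _
      rw [List.any_eq_false]
      intro w hw hsw
      have hp : w.toList.isPrefixOf (cs.drop i) = true := by
        rw [List.isPrefixOf_iff_prefix]
        exact (PySem.Chars.startswith_iff _ _).mp hsw
      have h1 := rfind_le cs w.toList i hp (hne w hw)
      have h2 := (hmax (-1)).2 w hw
      rw [← hmdef] at h2
      omega
    rw [hBnone]
    rfl
  · -- some word occurs; both replace at L = m.toNat with the first word matching there
    have hm0 : 0 ≤ m := by omega
    rcases foldl_max_mem_proj cs ws (-1) with h | ⟨wstar, hwstar, hmstar⟩
    · rw [← hmdef] at h; omega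
    rw [← hmdef] at hmstar
    have hwstar0 : 0 ≤ PySem.Chars.rfind cs wstar.toList := by omega
    rcases rfind_cases cs wstar.toList with h | ⟨_, _, hpstar⟩
    · omega
    set L := m.toNat with hL
    have hLstar : (PySem.Chars.rfind cs wstar.toList).toNat = L := by omega
    have hLlt : L < cs.length := by
      have := prefix_drop_lt_length cs wstar.toList _ (hne wstar hwstar) hpstar
      omega
    -- on ws, "rfind = m" and "matches at L" are the same predicate
    have hpredeq : ∀ w ∈ ws,
        (PySem.Chars.rfind cs w.toList == m) = PySem.Chars.startswith (cs.drop L) w.toList := by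
      intro w hw
      have h2 := (hmax (-1)).2 w hw
      rw [← hmdef] at h2
      rw [Bool.eq_iff_iff, beq_iff_eq, PySem.Chars.startswith_iff]
      constructor
      · intro heq
        rcases rfind_cases cs w.toList with h | ⟨_, _, hp⟩
        · omega
        · rw [List.isPrefixOf_iff_prefix] at hp
          rwa [show (PySem.Chars.rfind cs w.toList).toNat = L by omega] at hp
      · intro hp
        have := rfind_le cs w.toList L (List.isPrefixOf_iff_prefix.mpr hp) (hne w hw)
        omega
    have hfindSome : (ws.find? (fun w => PySem.Chars.rfind cs w.toList == m)).isSome := by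
      rw [List.find?_isSome]
      exact ⟨wstar, hwstar, by simp [hmstar]⟩
    rcases Option.isSome_iff_exists.mp hfindSome with ⟨wA, hwA⟩
    have hwAmem : wA ∈ ws := List.mem_of_find?_eq_some hwA
    have hwArf : PySem.Chars.rfind cs wA.toList = m := by
      have := List.find?_some hwA; simpa using this
    have hhitL : hitAt cs ws L = some wA := by
      unfold hitAt
      rw [find?_congr_mem ws _ _ (fun w hw => (hpredeq w hw).symm)]
      exact hwA
    have hBsome : (List.range cs.length).reverse.find?
        (fun i => ws.any (fun w => PySem.Chars.startswith (cs.drop i) w.toList)) = some L := by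
      apply findRev_some _ cs.length L hLlt
      · rw [List.any_eq_true]
        refine ⟨wA, hwAmem, ?_⟩
        have := List.find?_some (p := fun w' => PySem.Chars.startswith (cs.drop L) (String.toList w')) hhitL
        simpa using this
      · intro j hj1 hj2
        rw [List.any_eq_false]
        intro w hw hsw
        have hp : w.toList.isPrefixOf (cs.drop j) = true := by
          rw [List.isPrefixOf_iff_prefix]
          exact (PySem.Chars.startswith_iff _ _).mp hsw
        have h1 := rfind_le cs w.toList j hp (hne w hw)
        have h2 := (hmax (-1)).2 w hw
        rw [← hmdef] at h2
        omega
    rw [hfoldA, hBsome]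
    simp only [← hmdef, if_neg (show ¬ m ≤ -1 by omega)]
    rw [hwA]
    have hwAne : wA ≠ "" := by
      intro h; exact hpre (h ▸ hwAmem)
    have hidx : (PySem.List.index? ws wA).isSome := (PySem.List.index?_isSome_iff ws wA).mpr hwAmem
    rcases Option.isSome_iff_exists.mp hidx with ⟨k, hk⟩
    -- both sides splice at take L / drop (L + |wA|)
    have hrp : pyRpartition cs wA.toList =
        (cs.take L, wA.toList, cs.drop (L + wA.toList.length)) := by
      unfold pyRpartition
      rw [hwArf]
      rw [if_pos hm0]
    have hcast : ((L : Int) + PySem.Str.len wA).toNat = L + wA.toList.length := by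
      rw [PySem.Str.len_eq]; omega
    have hcast2 : ((L : Int)).toNat = L := by omega
    simp only [finishA, finishB]
    simp only [← hcs]
    simp only [
      show ws.find? (fun w => PySem.Chars.startswith (cs.drop L) w.toList) = some wA from hhitL,
      if_pos hwAne, hk, hrp,
      PySem.List.slice_to cs (show (0:Int) ≤ (L : Int) by positivity),
      PySem.List.slice_from cs (show (0:Int) ≤ (L : Int) + PySem.Str.len wA by
        rw [PySem.Str.len_eq]; positivity),
      hcast, hcast2]
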